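-- pv_equiv track=rewrite | github.com/ggxc3/100mscript | io_utils.py | _find_tabular_header
-- ===== SOURCE A (Python) =====
-- def _split_semicolon_columns(line):
--     """Rozdelí riadok podľa ';' a odstráni koncové prázdne položky."""
--     columns = line.rstrip("\r\n").split(";")
--     while columns and columns[-1] == "":
--         columns.pop()
--     return columns
--
-- def _has_tabular_followup(lines, start_index, expected_columns, min_columns=6):
--     """Overí, že po kandidátnom riadku nasledujú ďalšie riadky podobné tabuľke."""
--     seen_candidates = 0
--     tabular_rows = 0
--
--     for line in lines[start_index + 1:]:
--         if not line.strip():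
--             continue
--         seen_candidates += 1
--         cols_count = len(_split_semicolon_columns(line))
--         if cols_count >= max(min_columns, expected_columns - 1):
--             tabular_rows += 1
--             if tabular_rows >= 2:
--                 return True
--         if seen_candidates >= 25:
--             break
--
--     return False
--
-- def _find_tabular_header(lines, min_columns=6):
--     """
--     Nájde začiatok reálnej CSV tabuľky.
--     Preskočí technický úvod exportu (metadata blok), ktorý nie je dátová tabuľka.
--     """
--     first_candidate = None
--
--     for i, line in enumerate(lines):
--         cols = _split_semicolon_columns(line)
--         cols_count = len(cols)
--         if cols_count < min_columns:
--             continue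
--         if first_candidate is None:
--             first_candidate = (i, line.strip())
--         if _has_tabular_followup(lines, i, cols_count, min_columns=min_columns):
--             return i, line.strip()
--
--     return first_candidate if first_candidate is not None else (-1, None)
-- ===== SOURCE B (Python) =====
-- def _find_tabular_header(lines, min_columns=6):
--     # One pass builds a table of (column count, stripped text) per line, plus a
--     # compacted list of column counts of the non-blank lines and a rank array;
--     # the lookahead then reads a 25-wide window of that table instead of
--     # re-splitting raw lines.
--     info = []
--     for line in lines:
--         cols = line.rstrip("\r\n").split(";")
--         n = len(cols)
--         while n and cols[n - 1] == "":
--             n -= 1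
--         info.append((n, line.strip()))
--
--     nb_counts = []   # column counts of the non-blank lines, in order
--     rank = []        # rank[i] = number of non-blank lines before index i
--     for n, s in info:
--         rank.append(len(nb_counts))
--         if s:
--             nb_counts.append(n)
--
--     fallback = None
--     i = 0
--     for (n, s), r in zip(info, rank):
--         if n < min_columns:
--             i += 1
--             continue
--         if fallback is None:
--             fallback = (i, s)
--         start = r + 1 if s else r
--         window = nb_counts[start:start + 25]
--         if sum(m >= max(min_columns, n - 1) for m in window) >= 2:
--             return i, s
--         i += 1
--     return fallback if fallback is not None else (-1, None)
-- ===== Notes on version B (the rewrite author's own statement) =====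
-- stated objective: alternative
-- what changed: B makes one pass precomputing each line's (column count, stripped text), a compacted list of non-blank column counts and a rank array, then decides each candidate by counting matches in a 25-wide slice of that table instead of re-splitting raw lines in a nested stateful lookahead.
import Mathlib
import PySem

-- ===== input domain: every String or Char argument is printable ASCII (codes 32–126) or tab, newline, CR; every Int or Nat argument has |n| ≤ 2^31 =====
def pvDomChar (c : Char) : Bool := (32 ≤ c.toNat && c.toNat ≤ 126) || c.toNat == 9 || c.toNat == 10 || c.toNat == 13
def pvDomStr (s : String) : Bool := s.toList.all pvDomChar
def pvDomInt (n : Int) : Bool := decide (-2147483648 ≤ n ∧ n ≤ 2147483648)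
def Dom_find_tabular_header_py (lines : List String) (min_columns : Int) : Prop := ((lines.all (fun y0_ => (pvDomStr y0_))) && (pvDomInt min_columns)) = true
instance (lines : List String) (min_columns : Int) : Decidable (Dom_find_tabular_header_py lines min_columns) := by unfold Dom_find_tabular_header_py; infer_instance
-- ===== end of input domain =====

-- B replaces A's nested re-splitting lookahead by a precomputed table of column counts
-- (with a rank array into the compacted non-blank list) scanned through a 25-wide window.

-- ===== PORT A =====

-- line.rstrip("\r\n"): rstrip with an explicit chars argument, ported by hand (exact on all inputs:
-- drops trailing '\r'/'\n' characters).
def pvRstripCRLF (s : List Char) : List Char :=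
  (s.reverse.dropWhile (fun c => c == '\r' || c == '\n')).reverse

-- _split_semicolon_columns: split on ';' then the while-pop loop dropping trailing empty items.
def pvSplitSemicolonColumns (line : String) : List (List Char) :=
  let columns := PySem.Chars.splitOn (pvRstripCRLF line.toList) [';']
  ((columns.reverse.dropWhile (fun c => c == ([] : List Char))).reverse)

-- _has_tabular_followup's for-loop (state: seen_candidates, tabular_rows)
def pvFollowLoop (expected min_columns : Int) : List String → Int → Int → Bool
  | [], _, _ => false
  | line :: rest, seen, tab =>
    if PySem.Str.strip line = "" then pvFollowLoop expected min_columns rest seen tab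
    else
      let seen := seen + 1
      let colsCount : Int := (pvSplitSemicolonColumns line).length
      if max min_columns (expected - 1) ≤ colsCount then
        let tab := tab + 1
        if 2 ≤ tab then true
        else if 25 ≤ seen then false
        else pvFollowLoop expected min_columns rest seen tab
      else if 25 ≤ seen then false
      else pvFollowLoop expected min_columns rest seen tab

def pvHasTabularFollowup (lines : List String) (start_index expected min_columns : Int) : Bool :=
  pvFollowLoop expected min_columns (PySem.List.slice lines (some (start_index + 1)) none) 0 0

-- _find_tabular_header's main enumerate loop
def pvFindLoop (all : List String) (min_columns : Int) :
    List String → Int → Option (Int × String) → Int × Option String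
  | [], _, fc => match fc with
    | some (i, s) => (i, some s)
    | none => (-1, none)
  | line :: rest, i, fc =>
    let colsCount : Int := (pvSplitSemicolonColumns line).length
    if colsCount < min_columns then pvFindLoop all min_columns rest (i + 1) fc
    else
      let fc := if fc.isNone then some (i, PySem.Str.strip line) else fc
      if pvHasTabularFollowup all i colsCount min_columns then (i, PySem.Str.strip line)
      else pvFindLoop all min_columns rest (i + 1) fc

def find_tabular_header_py (lines : List String) (min_columns : Int) : Int × Option String :=
  pvFindLoop lines min_columns lines 0 none

-- ===== PORT B =====

-- Source B: n = len(cols); while n and cols[n-1] == "": n -= 1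
def pvbPopCount (cols : List (List Char)) : Nat → Nat
  | 0 => 0
  | n + 1 => if cols[n]! == ([] : List Char) then pvbPopCount cols n else n + 1

def pvbColCount (line : String) : Int :=
  let cols := PySem.Chars.splitOn (pvRstripCRLF line.toList) [';']
  (pvbPopCount cols cols.length : Int)

-- first pass: info = [(column count, stripped text)]
def pvbInfo (lines : List String) : List (Int × String) :=
  lines.map (fun line => (pvbColCount line, PySem.Str.strip line))

-- second pass: (nb_counts, rank)
def pvbTables (info : List (Int × String)) : List Int × List Int :=
  info.foldl
    (fun (st : List Int × List Int) p =>
      (if p.2 ≠ "" then st.1 ++ [p.1] else st.1, st.2 ++ [(st.1.length : Int)]))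
    ([], [])

-- final loop over zip(info, rank) with index i
def pvbMain (nb : List Int) (min_columns : Int) :
    List ((Int × String) × Int) → Int → Option (Int × String) → Int × Option String
  | [], _, fb => match fb with
    | some (i, s) => (i, some s)
    | none => (-1, none)
  | ((n, s), r) :: rest, i, fb =>
    if n < min_columns then pvbMain nb min_columns rest (i + 1) fb
    else
      let fb := if fb.isNone then some (i, s) else fb
      let start : Int := if s ≠ "" then r + 1 else r
      let window := PySem.List.slice nb (some start) (some (start + 25))
      if 2 ≤ ((window.countP (fun m => decide (max min_columns (n - 1) ≤ m))) : Int) then (i, s)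
      else pvbMain nb min_columns rest (i + 1) fb

def find_tabular_header_py_alt (lines : List String) (min_columns : Int) : Int × Option String :=
  let info := pvbInfo lines
  let t := pvbTables info
  pvbMain t.1 min_columns (info.zip t.2) 0 none

-- ===== PRECONDITION & SPEC =====
def Spec_find_tabular_header_py (lines : List String) (min_columns : Int) (out : Int × Option String) : Prop := out = find_tabular_header_py_alt lines min_columns
instance (lines : List String) (min_columns : Int) (out : Int × Option String) : Decidable (Spec_find_tabular_header_py lines min_columns out) := by unfold Spec_find_tabular_header_py; infer_instance

-- ===== CLAIM (what is proved, stated in full; the proofs are below) =====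
def Claim_equal_find_tabular_header_py : Prop := ∀ (lines : List String) (min_columns : Int), Dom_find_tabular_header_py lines min_columns → Spec_find_tabular_header_py lines min_columns (find_tabular_header_py lines min_columns)

-- ===== LEMMAS AND PROOFS =====

-- abbreviations used only by the proofs
def pvNbOf (info : List (Int × String)) : List Int :=
  (info.filter (fun p => !(p.2 == ""))).map (·.1)

def pvRankOf (info : List (Int × String)) : List Int :=
  (List.range info.length).map (fun k => ((pvNbOf (info.take k)).length : Int))

def pvNbSeq (xs : List String) : List Int :=
  (xs.filter (fun l => !(PySem.Str.strip l == ""))).map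
    (fun l => ((pvSplitSemicolonColumns l).length : Int))

-- B's integer-decrement pop loop counts the same columns as A's list-pop loop
theorem pvbPopCount_append (a : List Char) (l : List (List Char)) :
    ∀ n, n ≤ l.length → pvbPopCount (l ++ [a]) n = pvbPopCount l n := by
  intro n
  induction n with
  | zero => intro _; simp [pvbPopCount]
  | succ n ih =>
    intro h
    have hn : n < l.length := by omega
    simp only [pvbPopCount, List.getElem!_eq_getElem?_getD, List.getElem?_append_left hn]
    rw [ih (by omega)]

theorem pvbPopCount_eq (cols : List (List Char)) :
    pvbPopCount cols cols.length =
      ((cols.reverse.dropWhile (fun c => c == ([] : List Char))).length) := by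
  induction cols using List.reverseRecOn with
  | nil => simp [pvbPopCount]
  | append_singleton l a ih =>
    have hget : (l ++ [a])[l.length]? = some a := by
      rw [List.getElem?_append_right (by omega)]
      simp
    by_cases ha : a = ([] : List Char)
    · subst ha
      simp only [List.length_append, List.length_cons, List.length_nil,
        pvbPopCount, List.getElem!_eq_getElem?_getD, hget]
      simp only [Option.getD_some, BEq.rfl, if_true]
      rw [pvbPopCount_append _ _ _ (le_refl _), ih]
      simp
    · simp only [List.length_append, List.length_cons, List.length_nil,
        pvbPopCount, List.getElem!_eq_getElem?_getD, hget]
      have hne : a.isEmpty = false := by simpa [List.isEmpty_iff] using ha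
      simp [hne]

theorem pvbColCount_eq (line : String) :
    pvbColCount line = ((pvSplitSemicolonColumns line).length : Int) := by
  simp [pvbColCount, pvSplitSemicolonColumns, pvbPopCount_eq]

-- lookahead loop ↔ counting in the 25-window of the non-blank column-count sequence
theorem pvFollow_eq (exp minc : Int) :
    ∀ (rest : List String) (s t : Nat), s ≤ 24 → t ≤ 1 →
      pvFollowLoop exp minc rest (s : Int) (t : Int) =
        decide (2 ≤ (t : Int) +
          (((pvNbSeq rest).take (25 - s)).countP
            (fun m => decide (max minc (exp - 1) ≤ m)) : Int)) := by
  intro rest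
  induction rest with
  | nil =>
    intro s t hs ht
    simp only [pvFollowLoop, pvNbSeq, List.filter_nil, List.map_nil, List.take_nil,
      List.countP_nil]
    simp only [Nat.cast_zero, add_zero]
    rw [eq_comm, decide_eq_false_iff_not]
    omega
  | cons line rest ih =>
    intro s t hs ht
    by_cases hb : PySem.Str.strip line = ""
    · have h1 : pvFollowLoop exp minc (line :: rest) (s : Int) (t : Int) =
          pvFollowLoop exp minc rest (s : Int) (t : Int) := by
        simp [pvFollowLoop, hb]
      have h2 : pvNbSeq (line :: rest) = pvNbSeq rest := by
        simp [pvNbSeq, hb]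
      rw [h1, h2, ih s t hs ht]
    · have hbne : (PySem.Str.strip line == "") = false := by simpa using hb
      have htake : (pvNbSeq (line :: rest)).take (25 - s) =
          ((pvSplitSemicolonColumns line).length : Int) :: (pvNbSeq rest).take (24 - s) := by
        have h25 : 25 - s = (24 - s) + 1 := by omega
        simp [pvNbSeq, hbne, h25]
      rw [htake]
      by_cases hc : max minc (exp - 1) ≤ ((pvSplitSemicolonColumns line).length : Int)
      · have hcnt : ((((pvSplitSemicolonColumns line).length : Int) ::
            (pvNbSeq rest).take (24 - s)).countP
            (fun m => decide (max minc (exp - 1) ≤ m)))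
            = ((pvNbSeq rest).take (24 - s)).countP
              (fun m => decide (max minc (exp - 1) ≤ m)) + 1 := by
          have hd : decide (max minc (exp - 1) ≤
              ((pvSplitSemicolonColumns line).length : Int)) = true := decide_eq_true hc
          rw [List.countP_cons]
          simp only [hd]
          simp
        rw [hcnt]
        interval_cases t
        · -- t = 0
          by_cases hs24 : s = 24
          · subst hs24
            push_cast
            have h1 : pvFollowLoop exp minc (line :: rest) (24 : Int) 0 = false := by
              simp only [pvFollowLoop, if_neg hb, if_pos hc]
              norm_num
            rw [h1, eq_comm, decide_eq_false_iff_not]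
            simp only [List.take_zero, List.countP_nil]
            norm_num
          · have hs' : (s : Int) < 24 := by
              have : s < 24 := lt_of_le_of_ne hs hs24
              exact_mod_cast this
            push_cast
            have h1 : pvFollowLoop exp minc (line :: rest) (s : Int) 0 =
                pvFollowLoop exp minc rest ((s : Int) + 1) 1 := by
              simp only [pvFollowLoop, if_neg hb, if_pos hc]
              norm_num
              intro _
              omega
            have hc1 : ((s : Int) + 1) = (((s + 1 : Nat)) : Int) := by push_cast; ring
            have hc2 : (1 : Int) = ((1 : Nat) : Int) := by norm_num
            rw [h1, hc1, hc2, ih (s + 1) 1 (by omega) (by omega)]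
            have h24 : 25 - (s + 1) = 24 - s := by omega
            rw [h24]
            rw [decide_eq_decide]
            push_cast
            omega
        · -- t = 1
          push_cast
          have h1 : pvFollowLoop exp minc (line :: rest) (s : Int) 1 = true := by
            simp only [pvFollowLoop, if_neg hb, if_pos hc]
            norm_num
          rw [h1, eq_comm, decide_eq_true_iff]
          omega
      · have hcnt : ((((pvSplitSemicolonColumns line).length : Int) ::
            (pvNbSeq rest).take (24 - s)).countP
            (fun m => decide (max minc (exp - 1) ≤ m)))
            = ((pvNbSeq rest).take (24 - s)).countP
              (fun m => decide (max minc (exp - 1) ≤ m)) := by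
          have hd : decide (max minc (exp - 1) ≤
              ((pvSplitSemicolonColumns line).length : Int)) = false := by simpa using hc
          rw [List.countP_cons]
          simp only [hd]
          simp
        rw [hcnt]
        by_cases hs24 : s = 24
        · subst hs24
          push_cast
          have h1 : pvFollowLoop exp minc (line :: rest) (24 : Int) (t : Int) = false := by
            simp only [pvFollowLoop, if_neg hb, if_neg hc]
            norm_num
          rw [h1, eq_comm, decide_eq_false_iff_not]
          simp only [List.take_zero, List.countP_nil]
          push_cast
          omega
        · have hs' : (s : Int) < 24 := by
            have : s < 24 := lt_of_le_of_ne hs hs24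
            exact_mod_cast this
          have h1 : pvFollowLoop exp minc (line :: rest) (s : Int) (t : Int) =
              pvFollowLoop exp minc rest ((s : Int) + 1) (t : Int) := by
            simp only [pvFollowLoop, if_neg hb, if_neg hc]
            rw [if_neg (by omega : ¬ (25 : Int) ≤ (s : Int) + 1)]
          have hc1 : ((s : Int) + 1) = (((s + 1 : Nat)) : Int) := by push_cast; ring
          rw [h1, hc1, ih (s + 1) t (by omega) ht]
          have h24 : 25 - (s + 1) = 24 - s := by omega
          rw [h24]

-- characterization of the table-building pass
theorem pvNbOf_append (x y : List (Int × String)) :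
    pvNbOf (x ++ y) = pvNbOf x ++ pvNbOf y := by
  simp [pvNbOf, List.filter_append]

theorem pvbTables_eq (info : List (Int × String)) :
    pvbTables info = (pvNbOf info, pvRankOf info) := by
  induction info using List.reverseRecOn with
  | nil => simp [pvbTables, pvNbOf, pvRankOf]
  | append_singleton l p ih =>
    have hstep : pvbTables (l ++ [p]) =
        (if p.2 ≠ "" then (pvbTables l).1 ++ [p.1] else (pvbTables l).1,
         (pvbTables l).2 ++ [((pvbTables l).1.length : Int)]) := by
      simp [pvbTables, List.foldl_append]
    rw [hstep, ih]
    have h1 : pvNbOf (l ++ [p]) =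
        if p.2 ≠ "" then pvNbOf l ++ [p.1] else pvNbOf l := by
      rw [pvNbOf_append]
      by_cases hp : p.2 = ""
      · simp [pvNbOf, hp]
      · have : (p.2 == "") = false := by simpa using hp
        simp [pvNbOf, hp, this]
    have h2 : pvRankOf (l ++ [p]) = pvRankOf l ++ [((pvNbOf l).length : Int)] := by
      simp only [pvRankOf, List.length_append, List.length_cons, List.length_nil]
      rw [List.range_succ, List.map_append]
      congr 1
      · apply List.map_congr_left
        intro k hk
        have hk' : k ≤ l.length := by
          have := List.mem_range.mp hk; omega
        rw [List.take_append_of_le_length hk']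
      · simp
    rw [h1, h2]

theorem pvNbOf_info (xs : List String) : pvNbOf (pvbInfo xs) = pvNbSeq xs := by
  simp only [pvNbOf, pvbInfo, pvNbSeq, List.filter_map, List.map_map, pvbColCount_eq]
  rfl

theorem pvbInfo_take (xs : List String) (k : Nat) :
    (pvbInfo xs).take k = pvbInfo (xs.take k) := by
  simp [pvbInfo, List.map_take]

theorem pvRankOf_getElem (info : List (Int × String)) (k : Nat)
    (h : k < (pvRankOf info).length) :
    (pvRankOf info)[k] = ((pvNbOf (info.take k)).length : Int) := by
  simp [pvRankOf]

-- main loops agree on every suffix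
theorem pvMain_eq (all : List String) (minc : Int) :
    ∀ (l : List String) (k : Nat) (fb : Option (Int × String)), all.drop k = l →
      pvFindLoop all minc l (k : Int) fb =
        pvbMain (pvNbOf (pvbInfo all)) minc
          (((pvbInfo all).zip (pvRankOf (pvbInfo all))).drop k) (k : Int) fb := by
  intro l
  induction l with
  | nil =>
    intro k fb hk
    have hk' : all.length ≤ k := List.drop_eq_nil_iff.mp hk
    have hz : (((pvbInfo all).zip (pvRankOf (pvbInfo all))).drop k) = [] := by
      apply List.drop_eq_nil_iff.mpr
      simp [pvbInfo, pvRankOf]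
      omega
    rw [hz]
    cases fb with
    | none => rfl
    | some p => rfl
  | cons line l ih =>
    intro k fb hk
    have hklen : k < all.length := by
      by_contra h
      rw [List.drop_eq_nil_iff.mpr (by omega)] at hk
      cases hk
    have hsplit := List.drop_eq_getElem_cons hklen
    rw [hk] at hsplit
    injection hsplit with h1 h2
    have hline : all[k] = line := h1.symm ▸ rfl
    have hdrop1 : all.drop (k + 1) = l := h2.symm
    have hZlen : (((pvbInfo all).zip (pvRankOf (pvbInfo all)))).length = all.length := by
      simp [pvbInfo, pvRankOf]
    have hkZ : k < (((pvbInfo all).zip (pvRankOf (pvbInfo all)))).length := by omega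
    have hkI : k < (pvbInfo all).length := by simp [pvbInfo]; omega
    have hkR : k < (pvRankOf (pvbInfo all)).length := by simp [pvbInfo, pvRankOf]; omega
    have hZdrop := List.drop_eq_getElem_cons hkZ
    have hhead : (((pvbInfo all).zip (pvRankOf (pvbInfo all))))[k] =
        ((((pvSplitSemicolonColumns line).length : Int), PySem.Str.strip line),
         ((pvNbOf (pvbInfo (all.take k))).length : Int)) := by
      rw [List.getElem_zip]
      congr 1
      · show (pvbInfo all)[k] = _
        simp [pvbInfo, hline, pvbColCount_eq]
      · rw [pvRankOf_getElem _ _ hkR, pvbInfo_take]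
    rw [hZdrop, hhead]
    by_cases hlt : ((pvSplitSemicolonColumns line).length : Int) < minc
    · have hA : pvFindLoop all minc (line :: l) (k : Int) fb =
          pvFindLoop all minc l ((k : Int) + 1) fb := by
        simp only [pvFindLoop]
        rw [if_pos hlt]
      have hB : pvbMain (pvNbOf (pvbInfo all)) minc
            (((((pvSplitSemicolonColumns line).length : Int), PySem.Str.strip line),
              ((pvNbOf (pvbInfo (all.take k))).length : Int)) ::
              (((pvbInfo all).zip (pvRankOf (pvbInfo all))).drop (k + 1))) (k : Int) fb =
          pvbMain (pvNbOf (pvbInfo all)) minc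
            (((pvbInfo all).zip (pvRankOf (pvbInfo all))).drop (k + 1)) ((k : Int) + 1) fb := by
        simp only [pvbMain]
        rw [if_pos hlt]
      rw [hA, hB]
      have hc1 : ((k : Int) + 1) = (((k + 1 : Nat)) : Int) := by push_cast; ring
      rw [hc1]
      exact ih (k + 1) fb hdrop1
    · -- candidate line
      have hfol : pvHasTabularFollowup all (k : Int)
            ((pvSplitSemicolonColumns line).length : Int) minc =
          decide (2 ≤
            (((pvNbSeq (all.drop (k + 1))).take 25).countP
              (fun m => decide (max minc (((pvSplitSemicolonColumns line).length : Int) - 1) ≤ m)) : Int)) := by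
        unfold pvHasTabularFollowup
        have hc1 : ((k : Int) + 1) = (((k + 1 : Nat)) : Int) := by push_cast; ring
        rw [hc1, PySem.List.slice_from_natCast]
        have := pvFollow_eq ((pvSplitSemicolonColumns line).length : Int) minc
          (all.drop (k + 1)) 0 0 (by omega) (by omega)
        simpa using this
      have hstart : (if PySem.Str.strip line ≠ "" then
            ((pvNbOf (pvbInfo (all.take k))).length : Int) + 1
          else ((pvNbOf (pvbInfo (all.take k))).length : Int)) =
          ((pvNbOf (pvbInfo (all.take (k + 1)))).length : Int) := by
        have htk : all.take (k + 1) = all.take k ++ [line] := by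
          rw [List.take_add_one]
          simp [List.getElem?_eq_getElem hklen, hline]
        rw [htk]
        have : pvbInfo (all.take k ++ [line]) = pvbInfo (all.take k) ++ pvbInfo [line] := by
          simp [pvbInfo]
        rw [this, pvNbOf_append]
        by_cases hs : PySem.Str.strip line = ""
        · simp [pvbInfo, pvNbOf, hs]
        · have hb : (PySem.Str.strip line == "") = false := by simpa using hs
          simp [pvbInfo, pvNbOf, hs]
      have hwin : PySem.List.slice (pvNbOf (pvbInfo all))
            (some ((pvNbOf (pvbInfo (all.take (k + 1)))).length : Int))
            (some (((pvNbOf (pvbInfo (all.take (k + 1)))).length : Int) + 25)) =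
          (pvNbSeq (all.drop (k + 1))).take 25 := by
        have h25 : (((pvNbOf (pvbInfo (all.take (k + 1)))).length : Int) + 25) =
            (((pvNbOf (pvbInfo (all.take (k + 1)))).length : Int) + ((25 : Nat) : Int)) := by
          norm_num
        rw [h25, PySem.List.slice_natCast_add]
        have hsplitall : pvNbOf (pvbInfo all) =
            pvNbOf (pvbInfo (all.take (k + 1))) ++ pvNbOf (pvbInfo (all.drop (k + 1))) := by
          conv_lhs => rw [show all = all.take (k + 1) ++ all.drop (k + 1) from
            (List.take_append_drop (k + 1) all).symm]
          rw [show pvbInfo (all.take (k + 1) ++ all.drop (k + 1)) =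
            pvbInfo (all.take (k + 1)) ++ pvbInfo (all.drop (k + 1)) from by simp [pvbInfo]]
          exact pvNbOf_append _ _
        rw [hsplitall, List.drop_left, pvNbOf_info]
      -- unfold one step on both sides
      simp only [pvFindLoop, pvbMain]
      rw [if_neg hlt, if_neg hlt]
      rw [hstart, hwin, hfol]
      by_cases hP : (2 ≤
          (((pvNbSeq (all.drop (k + 1))).take 25).countP
            (fun m => decide (max minc (((pvSplitSemicolonColumns line).length : Int) - 1) ≤ m)) : Int))
      · rw [if_pos (by simpa using hP), if_pos hP]
      · rw [if_neg (by simpa using hP), if_neg hP]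
        have hc1 : ((k : Int) + 1) = (((k + 1 : Nat)) : Int) := by push_cast; ring
        rw [hc1]
        exact ih (k + 1) _ hdrop1

-- ===== VERDICT =====
theorem find_tabular_header_py_spec : Claim_equal_find_tabular_header_py := by
  intro lines minc _
  unfold Spec_find_tabular_header_py find_tabular_header_py find_tabular_header_py_alt
  show pvFindLoop lines minc lines 0 none =
    pvbMain (pvbTables (pvbInfo lines)).1 minc
      ((pvbInfo lines).zip (pvbTables (pvbInfo lines)).2) 0 none
  rw [pvbTables_eq]
  exact pvMain_eq lines minc lines 0 none rfl
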